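-- pv_equiv track=rewrite | github.com/PurreCoder/competitive-programming | Yandex Trainings 5.0/Contest 4/D.py | is_possible_to_fit
-- ===== SOURCE A (Python) =====
-- def get_page_height(a: list[int], width: int) -> int:
--     row, col = 1, 1
--     for num in a:
--         if col + num - 1 <= width:
--             col += num + 1
--         else:
--             row += 1
--             col = num + 2
--     return row
--
-- def is_possible_to_fit(a: list[int], b: list[int], w: int, h: int) -> bool:
--     # bounds for page partition
--     l, r = max(a) - 1, w - max(b)
--
--     if get_page_height(a, r) > h:
--         return False
--
--     while r - l > 1:
--         m = (l + r) // 2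
--         if get_page_height(a, m) > h:
--             l = m
--         else:
--             r = m
--
--     return get_page_height(b, w - r) <= h
-- ===== SOURCE B (Python) =====
-- def _fill(seq, i, rem):
--     # consume words of seq starting at i while they fit in the remaining space
--     while i < len(seq) and seq[i] <= rem:
--         rem -= seq[i] + 1
--         i += 1
--     return i
--
-- def _lines(seq, width):
--     # lay the text out line by line: the first line is filled from the full
--     # width, every later line is opened by the word that forced the break
--     lines = 1
--     i = _fill(seq, 0, width)
--     while i < len(seq):
--         lines += 1
--         i = _fill(seq, i + 1, width - seq[i] - 1)
--     return lines
--
-- def _narrowest(seq, h, lo, hi):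
--     # binary search on (lo, hi]: narrowest probed width whose layout is <= h lines
--     if hi - lo <= 1:
--         return hi
--     mid = (lo + hi) // 2
--     if _lines(seq, mid) <= h:
--         return _narrowest(seq, h, lo, mid)
--     return _narrowest(seq, h, mid, hi)
--
-- def is_possible_to_fit(a, b, w, h):
--     hi = w - max(b)
--     return _lines(a, hi) <= h and \
--         _lines(b, w - _narrowest(a, h, max(a) - 1, hi)) <= h
-- ===== Notes on version B (the rewrite author's own statement) =====
-- stated objective: alternative
-- what changed: The page height is computed line by line (a helper fills one line from the remaining space, an outer loop counts the lines) instead of a single-pass row/column state machine; the bisection is a recursive helper instead of an in-place while loop; and the result is one short-circuit conjunction instead of an early-return chain. Pre_ excludes only empty a or b, on which max() raises ValueError.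
import Mathlib
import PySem

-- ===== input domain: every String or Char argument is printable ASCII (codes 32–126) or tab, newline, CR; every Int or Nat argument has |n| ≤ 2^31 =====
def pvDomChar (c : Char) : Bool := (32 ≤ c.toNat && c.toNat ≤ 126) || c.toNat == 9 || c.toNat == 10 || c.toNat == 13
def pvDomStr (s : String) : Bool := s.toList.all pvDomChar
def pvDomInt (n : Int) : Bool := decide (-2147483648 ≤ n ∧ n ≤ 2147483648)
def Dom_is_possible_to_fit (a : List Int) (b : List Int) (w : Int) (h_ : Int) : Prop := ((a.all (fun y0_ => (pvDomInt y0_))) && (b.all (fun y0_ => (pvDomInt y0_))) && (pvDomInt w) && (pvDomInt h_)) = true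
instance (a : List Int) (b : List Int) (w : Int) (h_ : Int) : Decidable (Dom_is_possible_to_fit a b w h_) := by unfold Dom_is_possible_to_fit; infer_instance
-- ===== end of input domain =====

-- B computes the same value by a different decomposition: the page height laid out line by line
-- (fill one line from the remaining space, count lines), a recursive bisection helper, and one
-- short-circuit conjunction instead of the early-return chain.


-- ===== PORT A =====
def get_page_height (a : List Int) (width : Int) : Int :=
  (List.foldl (fun (rc : Int × Int) (num : Int) =>
      if rc.2 + num - 1 ≤ width then (rc.1, rc.2 + num + 1)
      else (rc.1 + 1, num + 2)) ((1 : Int), (1 : Int)) a).1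

-- the while loop of A, state (l, r); the Nat fuel only makes the recursion structural:
-- the gap r - l shrinks by at least 1 per iteration, so fuel (r - l).toNat is never exhausted
def bisectA (a : List Int) (h_ : Int) (fuel : Nat) (l r : Int) : Int :=
  match fuel with
  | 0 => r
  | fuel + 1 =>
    if r - l > 1 then
      let m := PySem.Int.floordiv (l + r) 2
      if get_page_height a m > h_ then bisectA a h_ fuel m r else bisectA a h_ fuel l m
    else r

def is_possible_to_fit (a : List Int) (b : List Int) (w : Int) (h_ : Int) : Bool :=
  let l := (PySem.List.max? a (fun x => x)).getD 0 - 1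
  let r := w - (PySem.List.max? b (fun x => x)).getD 0
  if get_page_height a r > h_ then false
  else decide (get_page_height b (w - bisectA a h_ (r - l).toNat l r) ≤ h_)

-- ===== PORT B =====
-- _fill: consume words of seq starting at index i while they fit in the remaining space;
-- fuel = seq.length - i only makes the index loop structural
def fillB (seq : List Int) (fuel : Nat) (i : Nat) (rem : Int) : Nat :=
  match fuel with
  | 0 => i
  | fuel + 1 =>
    match seq[i]? with
    | none => i
    | some x => if x ≤ rem then fillB seq fuel (i + 1) (rem - x - 1) else i

-- _lines' outer while loop; each iteration moves i past at least one word, so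
-- fuel = seq.length suffices
def linesLoop (seq : List Int) (width : Int) (fuel : Nat) (i : Nat) (lines : Int) : Int :=
  match fuel with
  | 0 => lines
  | fuel + 1 =>
    match seq[i]? with
    | none => lines
    | some x => linesLoop seq width fuel (fillB seq (seq.length - (i + 1)) (i + 1) (width - x - 1)) (lines + 1)

def lines_alt (seq : List Int) (width : Int) : Int :=
  linesLoop seq width seq.length (fillB seq seq.length 0 width) 1

-- recursive bisection helper _narrowest (fuel as in A's loop port)
def narrowestB (seq : List Int) (h_ : Int) (fuel : Nat) (lo hi : Int) : Int :=
  match fuel with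
  | 0 => hi
  | fuel + 1 =>
    if hi - lo ≤ 1 then hi
    else
      let mid := PySem.Int.floordiv (lo + hi) 2
      if lines_alt seq mid ≤ h_ then narrowestB seq h_ fuel lo mid else narrowestB seq h_ fuel mid hi

def is_possible_to_fit_alt (a : List Int) (b : List Int) (w : Int) (h_ : Int) : Bool :=
  let hi := w - (PySem.List.max? b (fun x => x)).getD 0
  decide (lines_alt a hi ≤ h_) &&
    decide (lines_alt b (w - narrowestB a h_ (hi - ((PySem.List.max? a (fun x => x)).getD 0 - 1)).toNat ((PySem.List.max? a (fun x => x)).getD 0 - 1) hi) ≤ h_)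

-- ===== PRECONDITION & SPEC =====
-- Pre_ excludes exactly the inputs on which Python A raises: max() of an empty list (ValueError).
def Pre_is_possible_to_fit (a : List Int) (b : List Int) (w : Int) (h_ : Int) : Prop :=
  a ≠ [] ∧ b ≠ []
instance (a : List Int) (b : List Int) (w : Int) (h_ : Int) : Decidable (Pre_is_possible_to_fit a b w h_) := by unfold Pre_is_possible_to_fit; infer_instance

def pvWitness_is_possible_to_fit : List Int × List Int × Int × Int := ([3, 1], [2], 10, 5)

def Spec_is_possible_to_fit (a : List Int) (b : List Int) (w : Int) (h_ : Int) (out : Bool) : Prop := out = is_possible_to_fit_alt a b w h_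
instance (a : List Int) (b : List Int) (w : Int) (h_ : Int) (out : Bool) : Decidable (Spec_is_possible_to_fit a b w h_ out) := by unfold Spec_is_possible_to_fit; infer_instance

-- ===== CLAIM (what is proved, stated in full; the proofs are below) =====
def Claim_equal_is_possible_to_fit : Prop := ∀ (a : List Int) (b : List Int) (w : Int) (h_ : Int), Dom_is_possible_to_fit a b w h_ → Pre_is_possible_to_fit a b w h_ → Spec_is_possible_to_fit a b w h_ (is_possible_to_fit a b w h_)

-- ===== LEMMAS AND PROOFS =====

-- abbreviation used only in the proofs: A's line-machine step
def stepA (width : Int) : Int × Int → Int → Int × Int := fun rc num =>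
  if rc.2 + num - 1 ≤ width then (rc.1, rc.2 + num + 1) else (rc.1 + 1, num + 2)

lemma fillB_ge (seq : List Int) : ∀ (fuel : Nat) (i : Nat) (rem : Int), i ≤ fillB seq fuel i rem := by
  intro fuel
  induction fuel with
  | zero => intro i rem; exact Nat.le_refl i
  | succ n ih =>
    intro i rem
    unfold fillB
    cases seq[i]? with
    | none => exact Nat.le_refl i
    | some x =>
      by_cases hx : x ≤ rem
      · simp only [hx, if_true]
        exact Nat.le_trans (Nat.le_succ i) (ih (i + 1) _)
      · simp only [hx, if_false]
        exact Nat.le_refl i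

-- core bridge: A's fold over the suffix from i, started at a column with `rem` space
-- left, equals "fill the line, then either stop or break at seq[j]"
lemma fill_fold (seq : List Int) (width : Int) : ∀ (fuel : Nat) (i : Nat), seq.length - i ≤ fuel →
    ∀ (rem : Int) (r : Int),
    (List.foldl (stepA width) (r, width + 1 - rem) (seq.drop i)).1 =
    (match seq[fillB seq fuel i rem]? with
     | none => r
     | some y => (List.foldl (stepA width) (r + 1, y + 2) (seq.drop (fillB seq fuel i rem + 1))).1) := by
  intro fuel
  induction fuel with
  | zero =>
    intro i hlen rem r
    have hi : seq.length ≤ i := by omega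
    rw [List.drop_eq_nil_of_le hi]
    have : seq[(fillB seq 0 i rem)]? = none := by
      unfold fillB; exact List.getElem?_eq_none hi
    rw [this]
    rfl
  | succ n ih =>
    intro i hlen rem r
    by_cases hi : i < seq.length
    · have hdrop : seq.drop i = seq[i] :: seq.drop (i + 1) := List.drop_eq_getElem_cons hi
      unfold fillB
      rw [List.getElem?_eq_getElem hi]
      by_cases hx : seq[i] ≤ rem
      · simp only [hx, if_true]
        rw [hdrop, List.foldl_cons]
        have hstep : stepA width (r, width + 1 - rem) seq[i] = (r, width + 1 - (rem - seq[i] - 1)) := by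
          unfold stepA
          rw [if_pos (by simp only; omega)]
          simp only [Prod.mk.injEq]
          exact ⟨trivial, by omega⟩
        rw [hstep]
        exact ih (i + 1) (by omega) (rem - seq[i] - 1) r
      · simp only [hx, if_false]
        rw [hdrop, List.foldl_cons]
        have hstep : stepA width (r, width + 1 - rem) seq[i] = (r + 1, seq[i] + 2) := by
          unfold stepA
          rw [if_neg (by simp only; omega)]
        rw [hstep, List.getElem?_eq_getElem hi]
    · have hge : seq.length ≤ i := by omega
      rw [List.drop_eq_nil_of_le hge]
      unfold fillB
      rw [List.getElem?_eq_none hge]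
      rw [List.getElem?_eq_none (by omega : seq.length ≤ i)]
      rfl

-- the break-continuation equals B's outer loop
lemma break_loop (seq : List Int) (width : Int) : ∀ (fuel : Nat) (j : Nat), seq.length - j ≤ fuel →
    ∀ (r : Int),
    (match seq[j]? with
     | none => r
     | some y => (List.foldl (stepA width) (r + 1, y + 2) (seq.drop (j + 1))).1) =
    linesLoop seq width fuel j r := by
  intro fuel
  induction fuel with
  | zero =>
    intro j hlen r
    have hj : seq.length ≤ j := by omega
    rw [List.getElem?_eq_none hj]
    rfl
  | succ n ih =>
    intro j hlen r
    unfold linesLoop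
    cases hget : seq[j]? with
    | none => rfl
    | some y =>
      have hj : j < seq.length := by
        by_contra hc
        rw [List.getElem?_eq_none (by omega)] at hget
        simp at hget
      show (List.foldl (stepA width) (r + 1, y + 2) (seq.drop (j + 1))).1
          = linesLoop seq width n (fillB seq (seq.length - (j + 1)) (j + 1) (width - y - 1)) (r + 1)
      have hy2 : (y : Int) + 2 = width + 1 - (width - y - 1) := by omega
      rw [hy2]
      rw [fill_fold seq width (seq.length - (j + 1)) (j + 1) (Nat.le_refl _) (width - y - 1) (r + 1)]
      exact ih (fillB seq (seq.length - (j + 1)) (j + 1) (width - y - 1))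
        (by have := fillB_ge seq (seq.length - (j + 1)) (j + 1) (width - y - 1); omega) (r + 1)

-- the two page-height computations agree
lemma lines_alt_eq (seq : List Int) (width : Int) :
    lines_alt seq width = get_page_height seq width := by
  have key := fill_fold seq width seq.length 0 (Nat.sub_le _ _) width 1
  rw [List.drop_zero] at key
  unfold lines_alt get_page_height
  show linesLoop seq width seq.length (fillB seq seq.length 0 width) 1
      = (List.foldl (stepA width) (1, 1) seq).1
  have h1 : ((1 : Int), (1 : Int)) = ((1 : Int), width + 1 - width) := by
    simp only [Prod.mk.injEq]
    exact ⟨trivial, by omega⟩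
  rw [h1, key]
  exact (break_loop seq width seq.length (fillB seq seq.length 0 width)
    (by have := fillB_ge seq seq.length 0 width; omega) 1).symm

-- the two bisections agree (same fuel, same probes)
lemma narrowestB_eq (a : List Int) (h_ : Int) : ∀ (fuel : Nat) (l r : Int),
    narrowestB a h_ fuel l r = bisectA a h_ fuel l r := by
  intro fuel
  induction fuel with
  | zero => intro l r; rfl
  | succ n ih =>
    intro l r
    show (if r - l ≤ 1 then r
          else if lines_alt a (PySem.Int.floordiv (l + r) 2) ≤ h_
            then narrowestB a h_ n l (PySem.Int.floordiv (l + r) 2)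
            else narrowestB a h_ n (PySem.Int.floordiv (l + r) 2) r)
        = (if r - l > 1 then
            if get_page_height a (PySem.Int.floordiv (l + r) 2) > h_
              then bisectA a h_ n (PySem.Int.floordiv (l + r) 2) r
              else bisectA a h_ n l (PySem.Int.floordiv (l + r) 2)
          else r)
    rw [lines_alt_eq]
    by_cases hgt : r - l > 1
    · have hnle : ¬ r - l ≤ 1 := by omega
      rw [if_neg hnle, if_pos hgt]
      by_cases hp : get_page_height a (PySem.Int.floordiv (l + r) 2) > h_
      · have hq : ¬ get_page_height a (PySem.Int.floordiv (l + r) 2) ≤ h_ := by omega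
        rw [if_neg hq, if_pos hp]; exact ih _ _
      · have hq : get_page_height a (PySem.Int.floordiv (l + r) 2) ≤ h_ := by omega
        rw [if_pos hq, if_neg hp]; exact ih _ _
    · have h2 : r - l ≤ 1 := by omega
      rw [if_pos h2, if_neg hgt]

-- the two entry points agree
lemma main_eq (a b : List Int) (w h_ : Int) :
    is_possible_to_fit a b w h_ = is_possible_to_fit_alt a b w h_ := by
  unfold is_possible_to_fit is_possible_to_fit_alt
  simp only [lines_alt_eq, narrowestB_eq]
  by_cases hfa : get_page_height a (w - (PySem.List.max? b (fun x => x)).getD 0) > h_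
  · have h1 : ¬ get_page_height a (w - (PySem.List.max? b (fun x => x)).getD 0) ≤ h_ := by omega
    simp [hfa, h1]
  · have h1 : get_page_height a (w - (PySem.List.max? b (fun x => x)).getD 0) ≤ h_ := by omega
    simp [hfa, h1]

-- ===== VERDICT (by name: the statement is the Claim_ definition above) =====
theorem is_possible_to_fit_spec : Claim_equal_is_possible_to_fit := by
  intro a b w h_ _ _
  unfold Spec_is_possible_to_fit
  exact main_eq a b w h_
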